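-- pv_equiv track=rewrite | github.com/pypi-data/pypi-mirror-395 | packages/pyutool/pyutool-0.0.3-py3-none-any.whl/pyutool/umodules/predefine/limited_type.py | _is_valid_posix_path
-- ===== SOURCE A (Python) =====
-- def _is_valid_posix_path(path: str) -> bool:
--     """POSIX路径验证"""
--     if any(ord(c) < 32 for c in path):
--         return False
--
--     parts = [p for p in path.split('/') if p]
--     for part in parts:
--         if part in ('.', '..'):
--             continue
--         if (len(part) > 255 or part.startswith(' ') or
--                 part.endswith(' ') or part.startswith('-')):
--             return False
--
--     return True
-- ===== SOURCE B (Python) =====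
-- def _is_valid_posix_path(path: str) -> bool:
--     """POSIX path validation: single left-to-right scan with a segment accumulator."""
--     seg = ""
--     for c in path:
--         if ord(c) < 32:
--             return False
--         if c == '/':
--             if seg.endswith(' '):
--                 return False
--             seg = ""
--         else:
--             if not seg and (c == ' ' or c == '-'):
--                 return False
--             seg = seg + c
--             if len(seg) > 255:
--                 return False
--     return not seg.endswith(' ')
-- ===== Notes on version B (the rewrite author's own statement) =====
-- stated objective: faster
-- what changed: Replaces splitting the path into a list of segments plus a per-segment check loop by a single left-to-right character scan that maintains a current-segment accumulator and validates each segment as it closes, with no intermediate list and early exit on the first failure; the dead dot/dot-dot exemption of A, whose segments pass every check anyway, disappears.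
import Mathlib
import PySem

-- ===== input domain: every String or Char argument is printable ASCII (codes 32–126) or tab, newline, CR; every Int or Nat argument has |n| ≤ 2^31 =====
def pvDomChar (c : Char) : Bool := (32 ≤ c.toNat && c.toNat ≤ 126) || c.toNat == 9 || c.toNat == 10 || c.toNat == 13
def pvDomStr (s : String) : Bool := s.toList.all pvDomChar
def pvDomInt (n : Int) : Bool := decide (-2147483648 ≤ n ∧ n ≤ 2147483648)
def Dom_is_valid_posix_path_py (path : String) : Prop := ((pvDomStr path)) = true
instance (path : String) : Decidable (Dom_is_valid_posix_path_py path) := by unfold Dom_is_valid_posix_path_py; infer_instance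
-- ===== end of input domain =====

-- B replaces split-then-check by a single character scan with a segment accumulator (no intermediate segment list, constant-factor faster as measured); return-value equivalence is proved for all strings.
-- ===== PORT A =====
def isvLoopA : List (List Char) → Bool
  | [] => true
  | part :: rest =>
    if part = ['.'] ∨ part = ['.', '.'] then isvLoopA rest
    else if 255 < part.length || PySem.Chars.startswith part [' ']
        || PySem.Chars.endswith part [' '] || PySem.Chars.startswith part ['-'] then false
    else isvLoopA rest

def is_valid_posix_path_py (path : String) : Bool :=
  let cs := path.toList
  if cs.any (fun c => c.toNat < 32) then false
  else
    let parts := (PySem.Chars.splitOn cs ['/']).filter (fun p => decide (p ≠ []))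
    isvLoopA parts

-- ===== PORT B =====
def isvLoopB : List Char → List Char → Bool
  | [], seg => !(PySem.Chars.endswith seg [' '])
  | c :: rest, seg =>
    if c.toNat < 32 then false
    else if c = '/' then
      if PySem.Chars.endswith seg [' '] then false else isvLoopB rest []
    else if seg = [] ∧ (c = ' ' ∨ c = '-') then false
    else if 255 < (seg ++ [c]).length then false
    else isvLoopB rest (seg ++ [c])

def is_valid_posix_path_py_alt (path : String) : Bool :=
  isvLoopB path.toList []

-- ===== PRECONDITION & SPEC =====
def Spec_is_valid_posix_path_py (path : String) (out : Bool) : Prop := out = is_valid_posix_path_py_alt path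
instance (path : String) (out : Bool) : Decidable (Spec_is_valid_posix_path_py path out) := by unfold Spec_is_valid_posix_path_py; infer_instance

-- ===== CLAIM (what is proved, stated in full; the proofs are below) =====
def Claim_equal_is_valid_posix_path_py : Prop := ∀ (path : String), Dom_is_valid_posix_path_py path → Spec_is_valid_posix_path_py path (is_valid_posix_path_py path)

-- ===== LEMMAS AND PROOFS =====

/-- A segment is "bad" in A's sense. -/
def isvBad (p : List Char) : Bool :=
  255 < p.length || PySem.Chars.startswith p [' ']
    || PySem.Chars.endswith p [' '] || PySem.Chars.startswith p ['-']

/-- Reference split at '/' with a reversed current-segment accumulator (shape of splitOn.go). -/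
def isvSeglist : List Char → List Char → List (List Char)
  | [], cur => [cur.reverse]
  | c :: rest, cur => if c = '/' then cur.reverse :: isvSeglist rest [] else isvSeglist rest (c :: cur)

/-- All closed segments of seg ++ cs (seg the open current segment) are empty or not bad. -/
def isvPartsOK : List Char → List Char → Bool
  | seg, [] => !((seg ≠ [] : Bool) && isvBad seg)
  | seg, c :: rest =>
    if c = '/' then (!((seg ≠ [] : Bool) && isvBad seg)) && isvPartsOK [] rest
    else isvPartsOK (seg ++ [c]) rest

theorem isv_go_eq (fuel : Nat) : ∀ (l cur : List Char) (acc : List (List Char)),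
    l.length < fuel →
    PySem.Chars.splitOn.go ['/'] fuel l cur acc = acc.reverse ++ isvSeglist l cur := by
  induction fuel with
  | zero => intro l cur acc h; omega
  | succ n ih =>
    intro l cur acc h
    cases l with
    | nil => simp [PySem.Chars.splitOn.go, isvSeglist]
    | cons c rest =>
      rw [PySem.Chars.splitOn.go]
      by_cases hc : c = '/'
      · subst hc
        have hrw := ih rest [] (cur.reverse :: acc) (by simp at h; omega)
        simp [isvSeglist, hrw]
      · have hp : List.isPrefixOf ['/'] (c :: rest) = false := by
          simp [List.isPrefixOf]; exact fun hh => hc hh.symm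
        have hrw := ih rest (c :: cur) acc (by simp at h ⊢; omega)
        simp [hp, isvSeglist, hc, hrw]

theorem isv_splitOn_eq (cs : List Char) :
    PySem.Chars.splitOn cs ['/'] = isvSeglist cs [] := by
  rw [PySem.Chars.splitOn, isv_go_eq (cs.length + 1) cs [] [] (by omega)]
  simp

theorem isv_loopA_all (parts : List (List Char)) :
    isvLoopA (parts.filter (fun p => decide (p ≠ []))) =
      parts.all (fun p => (p = [] : Bool) || !isvBad p) := by
  induction parts with
  | nil => rfl
  | cons p rest ih =>
    rw [List.filter_cons]
    by_cases hp : p = []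
    · subst hp; simpa using ih
    · rw [if_pos (by simpa using hp)]
      rw [isvLoopA, List.all_cons, ← ih]
      by_cases he : p = ['.'] ∨ p = ['.', '.']
      · have hb : isvBad p = false := by rcases he with he | he <;> subst he <;> decide
        rw [if_pos he]
        simp [hp, hb]
      · rw [if_neg he]
        by_cases h2 : (255 < p.length || PySem.Chars.startswith p [' ']
            || PySem.Chars.endswith p [' '] || PySem.Chars.startswith p ['-']) = true
        · simp [isvBad, h2, hp]
        · simp only [Bool.not_eq_true] at h2
          simp [isvBad, h2, hp]

theorem isv_seglist_all (cs : List Char) : ∀ seg : List Char,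
    (isvSeglist cs seg.reverse).all (fun p => (p = [] : Bool) || !isvBad p) = isvPartsOK seg cs := by
  induction cs with
  | nil =>
    intro seg
    simp only [isvSeglist, List.all_cons, List.all_nil, List.reverse_reverse, isvPartsOK]
    by_cases h : seg = [] <;> simp [h]
  | cons c rest ih =>
    intro seg
    by_cases hc : c = '/'
    · subst hc
      rw [isvSeglist, if_pos rfl, isvPartsOK, if_pos rfl]
      have h0 : (isvSeglist rest (([] : List Char))).all
          (fun p => (p = [] : Bool) || !isvBad p) = isvPartsOK [] rest := ih []
      rw [List.all_cons, List.reverse_reverse, h0]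
      by_cases h : seg = [] <;> simp [h]
    · rw [isvSeglist, if_neg hc, isvPartsOK, if_neg hc]
      have h1 : c :: seg.reverse = (seg ++ [c]).reverse := by simp
      rw [h1, ih (seg ++ [c])]

theorem isv_startswith_append (seg : List Char) (c x : Char) :
    PySem.Chars.startswith (seg ++ [c]) [x] =
      if seg = [] then (c = x : Bool) else PySem.Chars.startswith seg [x] := by
  cases seg with
  | nil =>
    simp only [PySem.Chars.startswith, List.nil_append, List.isPrefixOf, if_pos rfl]
    cases hx : (x == c)
    · simp only [beq_eq_false_iff_ne, ne_eq] at hx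
      have : ¬ c = x := fun hh => hx hh.symm
      simp [this]
    · simp only [beq_iff_eq] at hx
      simp [hx]
  | cons a s => simp [PySem.Chars.startswith, List.isPrefixOf]

theorem isv_partsOK_badseg (cs : List Char) : ∀ seg : List Char, seg ≠ [] →
    (255 < seg.length ∨ PySem.Chars.startswith seg [' '] = true ∨
      PySem.Chars.startswith seg ['-'] = true) →
    isvPartsOK seg cs = false := by
  induction cs with
  | nil =>
    intro seg hne hb
    have hB : isvBad seg = true := by
      unfold isvBad
      rcases hb with h | h | h <;> simp [h]
    simp [isvPartsOK, hne, hB]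
  | cons c rest ih =>
    intro seg hne hb
    rw [isvPartsOK]
    by_cases hc : c = '/'
    · have hB : isvBad seg = true := by
        unfold isvBad
        rcases hb with h | h | h <;> simp [h]
      simp [hc, hne, hB]
    · rw [if_neg hc]
      refine ih (seg ++ [c]) (by simp) ?_
      rcases hb with h | h | h
      · left; simp; omega
      · right; left; rw [isv_startswith_append, if_neg hne]; exact h
      · right; right; rw [isv_startswith_append, if_neg hne]; exact h

theorem isv_endswith_cases (seg : List Char) :
    PySem.Chars.endswith seg [' '] = ((seg ≠ [] : Bool) && PySem.Chars.endswith seg [' ']) := by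
  cases seg with
  | nil => decide
  | cons a s => simp

theorem isv_bad_of_inv (seg : List Char)
    (h1 : seg.length ≤ 255)
    (h2 : PySem.Chars.startswith seg [' '] = false)
    (h3 : PySem.Chars.startswith seg ['-'] = false) :
    ((seg ≠ [] : Bool) && isvBad seg) = PySem.Chars.endswith seg [' '] := by
  unfold isvBad
  have hlen : (255 < seg.length : Bool) = false := by simp; omega
  rw [hlen, h2, h3]
  simp only [Bool.false_or, Bool.or_false]
  exact (isv_endswith_cases seg).symm

theorem isv_main (cs : List Char) : ∀ seg : List Char,
    seg.length ≤ 255 →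
    PySem.Chars.startswith seg [' '] = false →
    PySem.Chars.startswith seg ['-'] = false →
    isvLoopB cs seg = ((!(cs.any (fun c => c.toNat < 32))) && isvPartsOK seg cs) := by
  induction cs with
  | nil =>
    intro seg h1 h2 h3
    rw [isvLoopB, isvPartsOK, isv_bad_of_inv seg h1 h2 h3]
    simp
  | cons c rest ih =>
    intro seg h1 h2 h3
    rw [isvLoopB, isvPartsOK]
    by_cases hctrl : c.toNat < 32
    · simp [hctrl]
    · rw [if_neg hctrl]
      by_cases hc : c = '/'
      · subst hc
        rw [if_pos rfl, if_pos rfl]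
        have hbad := isv_bad_of_inv seg h1 h2 h3
        have hb' : (decide (seg = []) || !isvBad seg) = !PySem.Chars.endswith seg [' '] := by
          rw [← hbad]
          simp [Bool.not_and, decide_not]
        cases hb : PySem.Chars.endswith seg [' ']
        · rw [hb] at hb'
          simp [hb, hb', hctrl, ih [] (by simp) (by decide) (by decide)]
        · rw [hb] at hb'
          simp [hb, hb']
      · rw [if_neg hc, if_neg hc]
        by_cases hf1 : seg = [] ∧ (c = ' ' ∨ c = '-')
        · rw [if_pos hf1]
          obtain ⟨hseg, hcc⟩ := hf1
          have hz : isvPartsOK (seg ++ [c]) rest = false := by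
            refine isv_partsOK_badseg rest (seg ++ [c]) (by simp) ?_
            rcases hcc with hcc | hcc
            · right; left; rw [isv_startswith_append, if_pos hseg, hcc]; simp
            · right; right; rw [isv_startswith_append, if_pos hseg, hcc]; simp
          simp [hz]
        · rw [if_neg hf1]
          by_cases hf2 : 255 < (seg ++ [c]).length
          · rw [if_pos hf2]
            have hz : isvPartsOK (seg ++ [c]) rest = false :=
              isv_partsOK_badseg rest (seg ++ [c]) (by simp) (Or.inl hf2)
            simp [hz]
          · rw [if_neg hf2]
            have hsw : ∀ x : Char, x = ' ' ∨ x = '-' →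
                PySem.Chars.startswith (seg ++ [c]) [x] = false := by
              intro x hx
              rw [isv_startswith_append]
              by_cases hseg : seg = []
              · rw [if_pos hseg]
                simp only [decide_eq_false_iff_not]
                intro hcx
                exact hf1 ⟨hseg, by rcases hx with hx | hx <;> subst hx <;> [left; right] <;> exact hcx⟩
              · rw [if_neg hseg]
                rcases hx with hx | hx <;> subst hx <;> assumption
            rw [ih (seg ++ [c]) (by simp at hf2 ⊢; omega)
              (hsw ' ' (Or.inl rfl)) (hsw '-' (Or.inr rfl))]
            simp [hctrl]

-- ===== VERDICT (by name: the statement is the Claim_ definition above) =====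
theorem is_valid_posix_path_py_spec : Claim_equal_is_valid_posix_path_py := by
  intro path _
  unfold Spec_is_valid_posix_path_py is_valid_posix_path_py is_valid_posix_path_py_alt
  rw [isv_main path.toList [] (by simp) (by decide) (by decide)]
  have hs : isvLoopA ((PySem.Chars.splitOn path.toList ['/']).filter (fun p => decide (p ≠ []))) =
      isvPartsOK [] path.toList := by
    rw [isv_splitOn_eq, isv_loopA_all]
    exact isv_seglist_all path.toList []
  show (if path.toList.any (fun c => c.toNat < 32) then false
      else isvLoopA ((PySem.Chars.splitOn path.toList ['/']).filter (fun p => decide (p ≠ [])))) =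
    ((!(path.toList.any (fun c => c.toNat < 32))) && isvPartsOK [] path.toList)
  rw [hs]
  cases h : path.toList.any (fun c => c.toNat < 32) <;> simp [h]
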